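-- pv_equiv track=rewrite | github.com/ybw051114/ai-agent | ai_agent/output/terminal.py | _is_markdown
-- ===== SOURCE A (Python) =====
-- def _is_markdown(content: str) -> bool:
--     """
--     检查内容是否为Markdown格式。
--
--     Args:
--         content: 要检查的内容
--
--     Returns:
--         bool: 是否为Markdown格式
--     """
--     markdown_indicators = [
--         "##",  # 标题
--         "*",   # 强调或列表
--         "_",   # 强调
--         "`",   # 代码
--         ">",   # 引用
--         "-",   # 列表或分隔线
--         "[",   # 链接
--         "!["   # 图片
--     ]
--     return any(indicator in content for indicator in markdown_indicators)
-- ===== SOURCE B (Python) =====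
-- def _is_markdown(content: str) -> bool:
--     """Single left-to-right scan: a one-char indicator, or a hash right after a hash."""
--     prev = ""
--     for ch in content:
--         if ch in "*_`>-[":
--             return True
--         if ch == "#" and prev == "#":
--             return True
--         prev = ch
--     return False
-- ===== Notes on version B (the rewrite author's own statement) =====
-- stated objective: alternative
-- what changed: Replaces eight separate substring scans over an indicator list by one single left-to-right character scan that checks a one-char indicator set and remembers the previous character to detect the doubled-hash indicator.
import Mathlib
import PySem

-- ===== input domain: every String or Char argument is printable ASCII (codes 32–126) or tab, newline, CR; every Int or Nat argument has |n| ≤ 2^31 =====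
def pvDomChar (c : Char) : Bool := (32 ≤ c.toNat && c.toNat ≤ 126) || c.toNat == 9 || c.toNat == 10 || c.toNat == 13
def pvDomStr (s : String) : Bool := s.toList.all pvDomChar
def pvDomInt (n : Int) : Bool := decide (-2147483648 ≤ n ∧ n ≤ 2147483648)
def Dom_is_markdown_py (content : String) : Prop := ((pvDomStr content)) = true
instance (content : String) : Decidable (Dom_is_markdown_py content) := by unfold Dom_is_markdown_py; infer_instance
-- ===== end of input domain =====

-- B replaces eight substring scans over an indicator list by one single character scan
-- remembering the previous character to detect the doubled-hash indicator (objective: alternative).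


-- ===== PORT A =====
def is_markdown_py (content : String) : Bool :=
  ["##", "*", "_", "`", ">", "-", "[", "!["].any (fun indicator => PySem.Str.isIn indicator content)

-- ===== PORT B =====
-- loop state: previous character (sentinel ' ' plays Python's initial prev = "", never equal to '#')
def pvAltLoop : Char → List Char → Bool
  | _, [] => false
  | prev, c :: rest =>
    if c = '*' ∨ c = '_' ∨ c = '`' ∨ c = '>' ∨ c = '-' ∨ c = '[' then true
    else if c = '#' ∧ prev = '#' then true
    else pvAltLoop c rest

def is_markdown_py_alt (content : String) : Bool := pvAltLoop ' ' content.toList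

-- ===== PRECONDITION & SPEC =====
def Spec_is_markdown_py (content : String) (out : Bool) : Prop := out = is_markdown_py_alt content
instance (content : String) (out : Bool) : Decidable (Spec_is_markdown_py content out) := by unfold Spec_is_markdown_py; infer_instance

-- ===== CLAIM (what is proved, stated in full; the proofs are below) =====
def Claim_equal_is_markdown_py : Prop := ∀ (content : String), Dom_is_markdown_py content → Spec_is_markdown_py content (is_markdown_py content)

-- ===== LEMMAS AND PROOFS =====

-- a one-character list is an infix iff the character occurs
theorem pv_singleton_infix {c : Char} {l : List Char} : [c] <:+: l ↔ c ∈ l := by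
  constructor
  · rintro ⟨s, t, h⟩
    subst h; simp
  · intro h
    obtain ⟨s, t, h⟩ := List.append_of_mem h
    exact ⟨s, t, by simp [h]⟩

-- the pair ['#','#'] in (prev :: l): either straddling the front or inside l
theorem pv_pair_cons {prev c : Char} {l : List Char} :
    (['#', '#'] <:+: prev :: c :: l) ↔ (prev = '#' ∧ c = '#') ∨ ['#', '#'] <:+: c :: l := by
  constructor
  · intro h
    rcases List.infix_cons_iff.mp h with h | h
    · rcases List.cons_prefix_cons.mp h with ⟨h1, h2⟩
      rcases List.cons_prefix_cons.mp h2 with ⟨h3, _⟩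
      exact Or.inl ⟨h1.symm, h3.symm⟩
    · exact Or.inr h
  · rintro (⟨h1, h2⟩ | h)
    · subst h1; subst h2
      exact List.infix_cons_iff.mpr (Or.inl (by simp))
    · exact List.infix_cons_iff.mpr (Or.inr h)

-- characterisation of B's loop
theorem pv_altLoop_iff (l : List Char) (prev : Char) :
    pvAltLoop prev l = true ↔
      (∃ c ∈ l, c = '*' ∨ c = '_' ∨ c = '`' ∨ c = '>' ∨ c = '-' ∨ c = '[') ∨
      ['#', '#'] <:+: prev :: l := by
  induction l generalizing prev with
  | nil =>
    simp [pvAltLoop]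
    intro h
    have := h.length_le
    simp at this
  | cons c rest ih =>
    rw [pvAltLoop]
    by_cases hs : c = '*' ∨ c = '_' ∨ c = '`' ∨ c = '>' ∨ c = '-' ∨ c = '['
    · simp [hs]
    · rw [if_neg hs]
      by_cases hp : c = '#' ∧ prev = '#'
      · simp [hp, pv_pair_cons]
      · rw [if_neg hp, ih c, pv_pair_cons]
        constructor
        · rintro (⟨d, hd, hdi⟩ | h)
          · exact Or.inl ⟨d, by simp [hd], hdi⟩
          · exact Or.inr (Or.inr h)
        · rintro (⟨d, hd, hdi⟩ | (⟨h1, h2⟩ | h))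
          · rcases List.mem_cons.mp hd with rfl | hd
            · exact absurd hdi hs
            · exact Or.inl ⟨d, hd, hdi⟩
          · exact absurd ⟨h2, h1⟩ hp
          · exact Or.inr h

-- the '![' indicator is subsumed by '['
theorem pv_bang_sub {l : List Char} (h : ['!', '['] <:+: l) : '[' ∈ l := by
  rcases h with ⟨s, t, h⟩
  subst h; simp

theorem pv_pair_drop_space {l : List Char} : (['#', '#'] <:+: (' ' : Char) :: l) ↔ ['#', '#'] <:+: l := by
  cases l with
  | nil =>
    constructor
    · intro h
      have := h.length_le
      simp at this
    · intro h
      have := h.length_le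
      simp at this
  | cons c rest =>
    rw [pv_pair_cons]
    constructor
    · rintro (⟨h1, _⟩ | h)
      · exact absurd h1 (by decide)
      · exact h
    · exact Or.inr

-- ===== VERDICT (by name: the statement is the Claim_ definition above) =====
theorem is_markdown_py_spec : Claim_equal_is_markdown_py := by
  intro content _
  unfold Spec_is_markdown_py is_markdown_py is_markdown_py_alt
  simp only [List.any_cons, List.any_nil, Bool.or_false]
  rw [Bool.eq_iff_iff]
  simp only [Bool.or_eq_true, PySem.Str.isIn_iff_infix]
  rw [pv_altLoop_iff, pv_pair_drop_space]
  constructor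
  · rintro (h | h | h | h | h | h | h | h)
    · exact Or.inr h
    · exact Or.inl ⟨'*', pv_singleton_infix.mp h, by simp⟩
    · exact Or.inl ⟨'_', pv_singleton_infix.mp h, by simp⟩
    · exact Or.inl ⟨'`', pv_singleton_infix.mp h, by simp⟩
    · exact Or.inl ⟨'>', pv_singleton_infix.mp h, by simp⟩
    · exact Or.inl ⟨'-', pv_singleton_infix.mp h, by simp⟩
    · exact Or.inl ⟨'[', pv_singleton_infix.mp h, by simp⟩
    · exact Or.inl ⟨'[', pv_bang_sub h, by simp⟩
  · rintro (⟨c, hc, hci⟩ | h)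
    · rcases hci with rfl | rfl | rfl | rfl | rfl | rfl
      · exact Or.inr (Or.inl (pv_singleton_infix.mpr hc))
      · exact Or.inr (Or.inr (Or.inl (pv_singleton_infix.mpr hc)))
      · exact Or.inr (Or.inr (Or.inr (Or.inl (pv_singleton_infix.mpr hc))))
      · exact Or.inr (Or.inr (Or.inr (Or.inr (Or.inl (pv_singleton_infix.mpr hc)))))
      · exact Or.inr (Or.inr (Or.inr (Or.inr (Or.inr (Or.inl (pv_singleton_infix.mpr hc))))))
      · exact Or.inr (Or.inr (Or.inr (Or.inr (Or.inr (Or.inr (Or.inl (pv_singleton_infix.mpr hc)))))))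
    · exact Or.inl h
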